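-- pv_equiv track=rewrite | github.com/Juniper/contrail-test | tcutils/contrail_status_check.py | get_service_role
-- ===== SOURCE A (Python) =====
-- def get_service_role(service):
--     '''
--     In case user mention "includeservice" to get status of particular
--     service, this function help get the role for that service
--     eg, for service "contrail-collector", this function will return the
--     role as "analytics" so that, analytics container can be used to
--     get the status in get_status.
--     '''
--     service_dict = {"controller" : ["contrail-control",
--                                     "contrail-control-nodemgr",
--                                     "contrail-dns",
--                                     "contrail-named",
--                                     "contrail-api",
--                                     "contrail-config-nodemgr",
--                                     "contrail-device-manager",
--                                     "contrail-schema",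
--                                     "contrail-svc-monitor",
--                                     "contrail-webui",
--                                     "contrail-webui-middleware"],
--                     "analytics" : ["contrail-alarm-gen",
--                                    "contrail-analytics-api",
--                                    "contrail-analytics-nodemgr",
--                                    "contrail-collector",
--                                    "contrail-query-engine",
--                                    "contrail-snmp-collector",
--                                    "contrail-topology"],
--                     "analyticsdb" : ["contrail-database",
--                                      "contrail-database-nodemgr",
--                                      "kafka"],
--                     "contrail-kube-manager" : ["contrail-kube-manager"],
--                     "compute" : ["contrail-vrouter-agent",
--                                  "contrail-vrouter-nodemgr"]}
--     for role in service_dict.keys():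
--         if service in service_dict[role]:
--             return role
-- ===== SOURCE B (Python) =====
-- _SERVICE_TO_ROLE = {
--     "contrail-control": "controller",
--     "contrail-control-nodemgr": "controller",
--     "contrail-dns": "controller",
--     "contrail-named": "controller",
--     "contrail-api": "controller",
--     "contrail-config-nodemgr": "controller",
--     "contrail-device-manager": "controller",
--     "contrail-schema": "controller",
--     "contrail-svc-monitor": "controller",
--     "contrail-webui": "controller",
--     "contrail-webui-middleware": "controller",
--     "contrail-alarm-gen": "analytics",
--     "contrail-analytics-api": "analytics",
--     "contrail-analytics-nodemgr": "analytics",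
--     "contrail-collector": "analytics",
--     "contrail-query-engine": "analytics",
--     "contrail-snmp-collector": "analytics",
--     "contrail-topology": "analytics",
--     "contrail-database": "analyticsdb",
--     "contrail-database-nodemgr": "analyticsdb",
--     "kafka": "analyticsdb",
--     "contrail-kube-manager": "contrail-kube-manager",
--     "contrail-vrouter-agent": "compute",
--     "contrail-vrouter-nodemgr": "compute",
-- }
--
-- def get_service_role(service):
--     return _SERVICE_TO_ROLE.get(service)
-- ===== Notes on version B (the rewrite author's own statement) =====
-- stated objective: simpler
-- what changed: Replaced the loop over roles with list-membership tests by one flat service-to-role dictionary and a single .get lookup.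
import Mathlib
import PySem

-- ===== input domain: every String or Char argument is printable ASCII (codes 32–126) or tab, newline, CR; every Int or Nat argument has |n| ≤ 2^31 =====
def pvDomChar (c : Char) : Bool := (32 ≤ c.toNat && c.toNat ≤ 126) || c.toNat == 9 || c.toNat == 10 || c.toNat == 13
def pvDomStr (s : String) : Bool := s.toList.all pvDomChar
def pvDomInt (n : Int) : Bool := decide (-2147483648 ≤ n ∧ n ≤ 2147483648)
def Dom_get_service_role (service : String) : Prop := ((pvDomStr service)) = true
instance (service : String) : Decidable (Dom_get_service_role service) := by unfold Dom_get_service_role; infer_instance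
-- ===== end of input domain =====

-- B replaces A's loop over roles with membership tests by one flat service-to-role dictionary and a single lookup (objective: simpler).

-- ===== PORT A =====
-- the dict literal service_dict (keys are distinct, so Dict.mk is the dict literal)
def pvServiceDict : PySem.Dict String (List String) := PySem.Dict.mk [
    ("controller", ["contrail-control", "contrail-control-nodemgr", "contrail-dns", "contrail-named", "contrail-api", "contrail-config-nodemgr", "contrail-device-manager", "contrail-schema", "contrail-svc-monitor", "contrail-webui", "contrail-webui-middleware"]),
    ("analytics", ["contrail-alarm-gen", "contrail-analytics-api", "contrail-analytics-nodemgr", "contrail-collector", "contrail-query-engine", "contrail-snmp-collector", "contrail-topology"]),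
    ("analyticsdb", ["contrail-database", "contrail-database-nodemgr", "kafka"]),
    ("contrail-kube-manager", ["contrail-kube-manager"]),
    ("compute", ["contrail-vrouter-agent", "contrail-vrouter-nodemgr"])]

-- the 'for role in service_dict.keys(): if service in service_dict[role]: return role' loop
def pvRoleLoop (service : String) : List String → Option String
  | [] => none
  | role :: rest =>
      if (PySem.Dict.getD pvServiceDict role []).contains service then some role
      else pvRoleLoop service rest

def get_service_role (service : String) : Option String :=
  pvRoleLoop service pvServiceDict.keys

-- ===== PORT B =====
-- the flat _SERVICE_TO_ROLE dict literal of Source B (keys distinct)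
def pvServiceToRole : PySem.Dict String String := PySem.Dict.mk [
    ("contrail-control", "controller"),
    ("contrail-control-nodemgr", "controller"),
    ("contrail-dns", "controller"),
    ("contrail-named", "controller"),
    ("contrail-api", "controller"),
    ("contrail-config-nodemgr", "controller"),
    ("contrail-device-manager", "controller"),
    ("contrail-schema", "controller"),
    ("contrail-svc-monitor", "controller"),
    ("contrail-webui", "controller"),
    ("contrail-webui-middleware", "controller"),
    ("contrail-alarm-gen", "analytics"),
    ("contrail-analytics-api", "analytics"),
    ("contrail-analytics-nodemgr", "analytics"),
    ("contrail-collector", "analytics"),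
    ("contrail-query-engine", "analytics"),
    ("contrail-snmp-collector", "analytics"),
    ("contrail-topology", "analytics"),
    ("contrail-database", "analyticsdb"),
    ("contrail-database-nodemgr", "analyticsdb"),
    ("kafka", "analyticsdb"),
    ("contrail-kube-manager", "contrail-kube-manager"),
    ("contrail-vrouter-agent", "compute"),
    ("contrail-vrouter-nodemgr", "compute")]

def get_service_role_alt (service : String) : Option String :=
  pvServiceToRole.get? service

-- ===== PRECONDITION & SPEC =====
def Spec_get_service_role (service : String) (out : Option String) : Prop := out = get_service_role_alt service
instance (service : String) (out : Option String) : Decidable (Spec_get_service_role service out) := by unfold Spec_get_service_role; infer_instance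

-- ===== CLAIM (what is proved, stated in full; the proofs are below) =====
def Claim_equal_get_service_role : Prop := ∀ (service : String), Dom_get_service_role service → Spec_get_service_role service (get_service_role service)

-- ===== LEMMAS AND PROOFS =====

-- case split on service being each of the 24 known service names; each branch evaluates both ports
set_option maxRecDepth 10000 in
theorem pv_main (service : String) :
    get_service_role service = get_service_role_alt service := by
  by_cases h1 : service = "contrail-control"
  · subst h1; simp [get_service_role, get_service_role_alt, pvRoleLoop, pvServiceDict, pvServiceToRole, PySem.Dict.getD, PySem.Dict.get?, PySem.Dict.keys]
  by_cases h2 : service = "contrail-control-nodemgr"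
  · subst h2; simp [get_service_role, get_service_role_alt, pvRoleLoop, pvServiceDict, pvServiceToRole, PySem.Dict.getD, PySem.Dict.get?, PySem.Dict.keys]
  by_cases h3 : service = "contrail-dns"
  · subst h3; simp [get_service_role, get_service_role_alt, pvRoleLoop, pvServiceDict, pvServiceToRole, PySem.Dict.getD, PySem.Dict.get?, PySem.Dict.keys]
  by_cases h4 : service = "contrail-named"
  · subst h4; simp [get_service_role, get_service_role_alt, pvRoleLoop, pvServiceDict, pvServiceToRole, PySem.Dict.getD, PySem.Dict.get?, PySem.Dict.keys]
  by_cases h5 : service = "contrail-api"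
  · subst h5; simp [get_service_role, get_service_role_alt, pvRoleLoop, pvServiceDict, pvServiceToRole, PySem.Dict.getD, PySem.Dict.get?, PySem.Dict.keys]
  by_cases h6 : service = "contrail-config-nodemgr"
  · subst h6; simp [get_service_role, get_service_role_alt, pvRoleLoop, pvServiceDict, pvServiceToRole, PySem.Dict.getD, PySem.Dict.get?, PySem.Dict.keys]
  by_cases h7 : service = "contrail-device-manager"
  · subst h7; simp [get_service_role, get_service_role_alt, pvRoleLoop, pvServiceDict, pvServiceToRole, PySem.Dict.getD, PySem.Dict.get?, PySem.Dict.keys]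
  by_cases h8 : service = "contrail-schema"
  · subst h8; simp [get_service_role, get_service_role_alt, pvRoleLoop, pvServiceDict, pvServiceToRole, PySem.Dict.getD, PySem.Dict.get?, PySem.Dict.keys]
  by_cases h9 : service = "contrail-svc-monitor"
  · subst h9; simp [get_service_role, get_service_role_alt, pvRoleLoop, pvServiceDict, pvServiceToRole, PySem.Dict.getD, PySem.Dict.get?, PySem.Dict.keys]
  by_cases h10 : service = "contrail-webui"
  · subst h10; simp [get_service_role, get_service_role_alt, pvRoleLoop, pvServiceDict, pvServiceToRole, PySem.Dict.getD, PySem.Dict.get?, PySem.Dict.keys]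
  by_cases h11 : service = "contrail-webui-middleware"
  · subst h11; simp [get_service_role, get_service_role_alt, pvRoleLoop, pvServiceDict, pvServiceToRole, PySem.Dict.getD, PySem.Dict.get?, PySem.Dict.keys]
  by_cases h12 : service = "contrail-alarm-gen"
  · subst h12; simp [get_service_role, get_service_role_alt, pvRoleLoop, pvServiceDict, pvServiceToRole, PySem.Dict.getD, PySem.Dict.get?, PySem.Dict.keys]
  by_cases h13 : service = "contrail-analytics-api"
  · subst h13; simp [get_service_role, get_service_role_alt, pvRoleLoop, pvServiceDict, pvServiceToRole, PySem.Dict.getD, PySem.Dict.get?, PySem.Dict.keys]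
  by_cases h14 : service = "contrail-analytics-nodemgr"
  · subst h14; simp [get_service_role, get_service_role_alt, pvRoleLoop, pvServiceDict, pvServiceToRole, PySem.Dict.getD, PySem.Dict.get?, PySem.Dict.keys]
  by_cases h15 : service = "contrail-collector"
  · subst h15; simp [get_service_role, get_service_role_alt, pvRoleLoop, pvServiceDict, pvServiceToRole, PySem.Dict.getD, PySem.Dict.get?, PySem.Dict.keys]
  by_cases h16 : service = "contrail-query-engine"
  · subst h16; simp [get_service_role, get_service_role_alt, pvRoleLoop, pvServiceDict, pvServiceToRole, PySem.Dict.getD, PySem.Dict.get?, PySem.Dict.keys]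
  by_cases h17 : service = "contrail-snmp-collector"
  · subst h17; simp [get_service_role, get_service_role_alt, pvRoleLoop, pvServiceDict, pvServiceToRole, PySem.Dict.getD, PySem.Dict.get?, PySem.Dict.keys]
  by_cases h18 : service = "contrail-topology"
  · subst h18; simp [get_service_role, get_service_role_alt, pvRoleLoop, pvServiceDict, pvServiceToRole, PySem.Dict.getD, PySem.Dict.get?, PySem.Dict.keys]
  by_cases h19 : service = "contrail-database"
  · subst h19; simp [get_service_role, get_service_role_alt, pvRoleLoop, pvServiceDict, pvServiceToRole, PySem.Dict.getD, PySem.Dict.get?, PySem.Dict.keys]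
  by_cases h20 : service = "contrail-database-nodemgr"
  · subst h20; simp [get_service_role, get_service_role_alt, pvRoleLoop, pvServiceDict, pvServiceToRole, PySem.Dict.getD, PySem.Dict.get?, PySem.Dict.keys]
  by_cases h21 : service = "kafka"
  · subst h21; simp [get_service_role, get_service_role_alt, pvRoleLoop, pvServiceDict, pvServiceToRole, PySem.Dict.getD, PySem.Dict.get?, PySem.Dict.keys]
  by_cases h22 : service = "contrail-kube-manager"
  · subst h22; simp [get_service_role, get_service_role_alt, pvRoleLoop, pvServiceDict, pvServiceToRole, PySem.Dict.getD, PySem.Dict.get?, PySem.Dict.keys]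
  by_cases h23 : service = "contrail-vrouter-agent"
  · subst h23; simp [get_service_role, get_service_role_alt, pvRoleLoop, pvServiceDict, pvServiceToRole, PySem.Dict.getD, PySem.Dict.get?, PySem.Dict.keys]
  by_cases h24 : service = "contrail-vrouter-nodemgr"
  · subst h24; simp [get_service_role, get_service_role_alt, pvRoleLoop, pvServiceDict, pvServiceToRole, PySem.Dict.getD, PySem.Dict.get?, PySem.Dict.keys]
  simp [get_service_role, get_service_role_alt, pvRoleLoop, pvServiceDict, pvServiceToRole, PySem.Dict.getD, PySem.Dict.get?, PySem.Dict.keys,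
        h1, Ne.symm h1, h2, Ne.symm h2, h3, Ne.symm h3, h4, Ne.symm h4, h5, Ne.symm h5, h6, Ne.symm h6, h7, Ne.symm h7, h8, Ne.symm h8, h9, Ne.symm h9, h10, Ne.symm h10, h11, Ne.symm h11, h12, Ne.symm h12, h13, Ne.symm h13, h14, Ne.symm h14, h15, Ne.symm h15, h16, Ne.symm h16, h17, Ne.symm h17, h18, Ne.symm h18, h19, Ne.symm h19, h20, Ne.symm h20, h21, Ne.symm h21, h22, Ne.symm h22, h23, Ne.symm h23, h24, Ne.symm h24]

-- ===== VERDICT (by name: the statement is the Claim_ definition above) =====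
theorem get_service_role_spec : Claim_equal_get_service_role := by
  intro service _
  exact pv_main service
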